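-- pv_equiv track=rewrite | github.com/feadoor/hackerrank | practice/algorithms/search/hackerland_radio_transmitters.py | count_transmitters
-- ===== SOURCE A (Python) =====
-- def count_transmitters(sorted_houses, transmitter_distance):
--     transmitters, idx = 0, 0
--     while idx < len(sorted_houses):
--         threshold = sorted_houses[idx] + transmitter_distance
--         while idx < len(sorted_houses) and sorted_houses[idx] <= threshold:
--             idx += 1
--         reach = sorted_houses[idx - 1] + transmitter_distance
--         while idx < len(sorted_houses) and sorted_houses[idx] <= reach:
--             idx += 1
--         transmitters += 1
--     return transmitters
-- ===== SOURCE B (Python) =====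
-- def count_transmitters(sorted_houses, transmitter_distance):
--     # One-pass fold with an explicit 3-state machine (new/climb/skip)
--     # instead of index-stepping nested while loops.
--     count = 0
--     mode = 0  # 0 = start a new segment, 1 = climbing to the transmitter, 2 = skipping covered houses
--     bound = 0
--     prev = 0
--     for x in sorted_houses:
--         if mode == 0:
--             count += 1
--             bound = x + transmitter_distance
--             prev = x
--             mode = 1
--         elif mode == 1:
--             if x <= bound:
--                 prev = x
--             else:
--                 reach = prev + transmitter_distance
--                 if x <= reach:
--                     bound = reach
--                     mode = 2
--                 else:
--                     count += 1
--                     bound = x + transmitter_distance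
--                     prev = x
--         else:
--             if x > bound:
--                 count += 1
--                 bound = x + transmitter_distance
--                 prev = x
--                 mode = 1
--     return count
-- ===== Notes on version B (the rewrite author's own statement) =====
-- stated objective: alternative
-- what changed: Replaced the index-based outer loop with three inner element-stepping while loops by a single left-to-right fold driven by an explicit 3-state machine (new-segment/climb/skip) carrying (count, mode, bound, prev); no list indexing or repeated len() checks at all.
import Mathlib
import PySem

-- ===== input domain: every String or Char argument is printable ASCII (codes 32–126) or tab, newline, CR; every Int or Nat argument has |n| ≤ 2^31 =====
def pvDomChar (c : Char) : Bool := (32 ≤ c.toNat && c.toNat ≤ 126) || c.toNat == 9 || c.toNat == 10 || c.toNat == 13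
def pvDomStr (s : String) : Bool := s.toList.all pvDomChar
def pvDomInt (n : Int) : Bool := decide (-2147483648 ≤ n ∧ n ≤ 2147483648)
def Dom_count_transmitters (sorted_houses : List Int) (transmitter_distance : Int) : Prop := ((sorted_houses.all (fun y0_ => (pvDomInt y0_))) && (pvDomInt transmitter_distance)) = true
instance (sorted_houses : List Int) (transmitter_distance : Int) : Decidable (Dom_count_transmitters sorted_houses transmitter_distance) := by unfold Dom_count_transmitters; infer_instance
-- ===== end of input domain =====

-- B replaces A's index-stepping nested while loops by a single left fold with an
-- explicit 3-state machine (same O(n) cost, different decomposition); Pre_ excludes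
-- nonempty input with a negative transmitter_distance, on which A loops forever.


-- ===== PORT A =====
-- inner 'while idx < len(h) and h[idx] <= bound: idx += 1' (both inner loops have this shape)
def ctAdvance (houses : List Int) (bound : Int) (idx : Nat) : Nat :=
  if h : idx < houses.length then
    if houses[idx] ≤ bound then ctAdvance houses bound (idx + 1) else idx
  else idx
termination_by houses.length - idx

-- outer 'while idx < len(sorted_houses)'; under Pre_ each iteration advances idx by at
-- least 1, so fuel = length is exact there (Python diverges outside Pre_).
-- 'sorted_houses[idx - 1]' is ported with pyGet? on the Int index (Python wraparound at idx = 0).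
def ctLoop (houses : List Int) (d : Int) : Nat → Int → Nat → Int
  | 0, t, _ => t
  | fuel + 1, t, idx =>
    if idx < houses.length then
      let threshold := (PySem.List.pyGet? houses (idx : Int)).getD 0 + d
      let idx1 := ctAdvance houses threshold idx
      let reach := (PySem.List.pyGet? houses ((idx1 : Int) - 1)).getD 0 + d
      let idx2 := ctAdvance houses reach idx1
      ctLoop houses d fuel (t + 1) idx2
    else t

def count_transmitters (sorted_houses : List Int) (transmitter_distance : Int) : Int :=
  ctLoop sorted_houses transmitter_distance sorted_houses.length 0 0

-- ===== PORT B =====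
-- state = (count, mode, bound, prev); mode 0 = start new segment, 1 = climbing, 2 = skipping
def ctStep (d : Int) (s : Int × Int × Int × Int) (x : Int) : Int × Int × Int × Int :=
  match s with
  | (count, mode, bound, prev) =>
    if mode = 0 then (count + 1, 1, x + d, x)
    else if mode = 1 then
      if x ≤ bound then (count, 1, bound, x)
      else
        let reach := prev + d
        if x ≤ reach then (count, 2, reach, prev)
        else (count + 1, 1, x + d, x)
    else
      if bound < x then (count + 1, 1, x + d, x)
      else (count, mode, bound, prev)

def count_transmitters_alt (sorted_houses : List Int) (transmitter_distance : Int) : Int :=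
  (sorted_houses.foldl (ctStep transmitter_distance) (0, 0, 0, 0)).1

-- ===== PRECONDITION & SPEC =====
-- Pre_ excludes exactly the inputs on which Python A never returns: on a nonempty list
-- with transmitter_distance < 0 the first inner while never advances idx, so the outer
-- loop repeats forever (A diverges; it returns on everything Pre_ admits).
def Pre_count_transmitters (sorted_houses : List Int) (transmitter_distance : Int) : Prop :=
  sorted_houses = [] ∨ 0 ≤ transmitter_distance
instance (sorted_houses : List Int) (transmitter_distance : Int) : Decidable (Pre_count_transmitters sorted_houses transmitter_distance) := by unfold Pre_count_transmitters; infer_instance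

def pvWitness_count_transmitters : List Int × Int := ([1, 2, 3, 5, 9], 1)

def Spec_count_transmitters (sorted_houses : List Int) (transmitter_distance : Int) (out : Int) : Prop := out = count_transmitters_alt sorted_houses transmitter_distance
instance (sorted_houses : List Int) (transmitter_distance : Int) (out : Int) : Decidable (Spec_count_transmitters sorted_houses transmitter_distance out) := by unfold Spec_count_transmitters; infer_instance

-- ===== CLAIM (what is proved, stated in full; the proofs are below) =====
def Claim_equal_count_transmitters : Prop := ∀ (sorted_houses : List Int) (transmitter_distance : Int), Dom_count_transmitters sorted_houses transmitter_distance → Pre_count_transmitters sorted_houses transmitter_distance → Spec_count_transmitters sorted_houses transmitter_distance (count_transmitters sorted_houses transmitter_distance)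

-- ===== LEMMAS AND PROOFS =====

-- common spec: greedy segment counter on lists
def ctClimb (bound prev : Int) : List Int → List Int × Int
  | [] => ([], prev)
  | x :: xs => if x ≤ bound then ctClimb bound x xs else (x :: xs, prev)

lemma ctClimb_length (bound prev : Int) (xs : List Int) : (ctClimb bound prev xs).1.length ≤ xs.length := by
  induction xs generalizing prev with
  | nil => simp [ctClimb]
  | cons x xs ih =>
    simp only [ctClimb]
    split
    · exact le_trans (ih x) (Nat.le_succ _)
    · simp

def ctS (d : Int) : List Int → Int
  | [] => 0
  | x :: xs =>
    let c := ctClimb (x + d) x xs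
    1 + ctS d (c.1.dropWhile (fun y => decide (y ≤ c.2 + d)))
termination_by l => l.length
decreasing_by
  have h1 := ctClimb_length (x + d) x xs
  have h2 := List.length_dropWhile_le (fun y => decide (y ≤ (ctClimb (x + d) x xs).2 + d)) (ctClimb (x + d) x xs).1
  simp only [List.length_cons]
  omega

lemma ctClimb_eq (bound : Int) (xs : List Int) : ∀ prev, ctClimb bound prev xs =
    (xs.dropWhile (fun y => decide (y ≤ bound)), (xs.takeWhile (fun y => decide (y ≤ bound))).getLastD prev) := by
  induction xs with
  | nil => intro prev; simp [ctClimb]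
  | cons x xs ih =>
    intro prev
    by_cases h : x ≤ bound
    · cases htw : xs.takeWhile (fun y => decide (y ≤ bound)) with
      | nil => simp [ctClimb, h, ih x, htw]
      | cons a l =>
        have hg : (a :: l).getLast? = some ((a :: l).getLast (by simp)) :=
          List.getLast?_eq_some_getLast (by simp)
        simp [ctClimb, h, ih x, htw, hg]
    · simp [ctClimb, h]

-- ---------- B side ----------

lemma foldB_mode2 (d : Int) (xs : List Int) : ∀ c b p,
    (List.foldl (ctStep d) (c, 2, b, p) xs).1 =
    (List.foldl (ctStep d) (c, 0, 0, 0) (xs.dropWhile (fun y => decide (y ≤ b)))).1 := by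
  induction xs with
  | nil => intro c b p; simp
  | cons x xs ih =>
    intro c b p
    by_cases h : x ≤ b
    · have hb : ¬ b < x := not_lt.mpr h
      simp [ctStep, hb, h, ih c b p]
    · have hb : b < x := not_le.mp h
      simp [ctStep, hb, h]

lemma foldB_mode1 (d : Int) (xs : List Int) : ∀ c b p,
    (List.foldl (ctStep d) (c, 1, b, p) xs).1 =
    (List.foldl (ctStep d) (c, 0, 0, 0)
      ((ctClimb b p xs).1.dropWhile (fun y => decide (y ≤ (ctClimb b p xs).2 + d)))).1 := by
  induction xs with
  | nil => intro c b p; simp [ctClimb]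
  | cons x xs ih =>
    intro c b p
    by_cases h : x ≤ b
    · simp only [ctClimb, if_pos h]
      simpa [ctStep, h] using ih c b x
    · simp only [ctClimb, if_neg h]
      by_cases hr : x ≤ p + d
      · have : (List.foldl (ctStep d) (c, 1, b, p) (x :: xs)).1 =
            (List.foldl (ctStep d) (c, 2, p + d, p) xs).1 := by
          simp [ctStep, h, hr]
        rw [this, foldB_mode2]
        simp [List.dropWhile, hr]
      · simp [ctStep, h, hr, List.dropWhile]

lemma foldB_eq_ctS (d : Int) : ∀ (n : Nat) (xs : List Int) (c : Int), xs.length ≤ n →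
    (List.foldl (ctStep d) (c, 0, 0, 0) xs).1 = c + ctS d xs := by
  intro n
  induction n with
  | zero =>
    intro xs c h
    have : xs = [] := List.eq_nil_of_length_eq_zero (Nat.le_zero.mp h)
    subst this; simp [ctS]
  | succ n ih =>
    intro xs c h
    match xs with
    | [] => simp [ctS]
    | x :: xs =>
      have h0 : (List.foldl (ctStep d) (c, 0, 0, 0) (x :: xs)).1 =
          (List.foldl (ctStep d) (c + 1, 1, x + d, x) xs).1 := by
        simp [ctStep]
      rw [h0, foldB_mode1]
      have hlen : ((ctClimb (x + d) x xs).1.dropWhile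
          (fun y => decide (y ≤ (ctClimb (x + d) x xs).2 + d))).length ≤ n := by
        have h1 := ctClimb_length (x + d) x xs
        have h2 := List.length_dropWhile_le (fun y => decide (y ≤ (ctClimb (x + d) x xs).2 + d)) (ctClimb (x + d) x xs).1
        simp only [List.length_cons] at h
        omega
      rw [ih _ _ hlen]
      have : ctS d (x :: xs) = 1 + ctS d ((ctClimb (x + d) x xs).1.dropWhile
          (fun y => decide (y ≤ (ctClimb (x + d) x xs).2 + d))) := by
        simp [ctS]
      rw [this]; ring

-- ---------- A side ----------

lemma ctAdvance_eq (houses : List Int) (bound : Int) : ∀ (n idx : Nat), houses.length ≤ idx + n →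
    ctAdvance houses bound idx = idx + ((houses.drop idx).takeWhile (fun y => decide (y ≤ bound))).length := by
  intro n
  induction n with
  | zero =>
    intro idx h
    rw [ctAdvance]
    have h1 : ¬ idx < houses.length := by omega
    simp [h1, List.drop_eq_nil_of_le (by omega : houses.length ≤ idx)]
  | succ n ih =>
    intro idx h
    rw [ctAdvance]
    by_cases h1 : idx < houses.length
    · rw [dif_pos h1, List.drop_eq_getElem_cons h1]
      by_cases h2 : houses[idx] ≤ bound
      · rw [if_pos h2, ih (idx + 1) (by omega),
          List.takeWhile_cons_of_pos (by simpa using h2)]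
        simp
        omega
      · rw [if_neg h2, List.takeWhile_cons_of_neg (by simpa using h2)]
        simp
    · rw [dif_neg h1]
      simp [List.drop_eq_nil_of_le (by omega : houses.length ≤ idx)]

lemma drop_takeWhile_length (p : Int → Bool) : ∀ (l : List Int),
    List.drop (List.takeWhile p l).length l = List.dropWhile p l := by
  intro l
  induction l with
  | nil => rfl
  | cons x l ih =>
    by_cases h : p x = true
    · rw [List.takeWhile_cons_of_pos h, List.dropWhile_cons_of_pos h]
      simpa using ih
    · rw [List.takeWhile_cons_of_neg (by simp [h]), List.dropWhile_cons_of_neg (by simp [h])]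
      simp

lemma drop_ctAdvance (houses : List Int) (bound : Int) (idx : Nat) (_h : idx ≤ houses.length) :
    houses.drop (ctAdvance houses bound idx) = (houses.drop idx).dropWhile (fun y => decide (y ≤ bound)) := by
  rw [ctAdvance_eq houses bound houses.length idx (by omega), ← List.drop_drop,
    drop_takeWhile_length]

lemma ctLoop_eq (houses : List Int) (d : Int) (hd : 0 ≤ d) :
    ∀ (fuel : Nat) (idx : Nat) (t : Int), houses.length ≤ idx + fuel →
      ctLoop houses d fuel t idx = t + ctS d (houses.drop idx) := by
  intro fuel
  induction fuel with
  | zero =>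
    intro idx t h
    simp [ctLoop, List.drop_eq_nil_of_le (by omega : houses.length ≤ idx), ctS]
  | succ fuel ih =>
    intro idx t h
    by_cases h1 : idx < houses.length
    · -- name the pieces
      have hdrop : houses.drop idx = houses[idx] :: houses.drop (idx + 1) := List.drop_eq_getElem_cons h1
      have hget : PySem.List.pyGet? houses (idx : Int) = some houses[idx] := by
        rw [PySem.List.pyGet?_natCast]; exact List.getElem?_eq_getElem h1
      set h0 := houses[idx] with hh0
      set thr := h0 + d with hthr
      set tw := (houses.drop (idx + 1)).takeWhile (fun y => decide (y ≤ thr)) with htw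
      -- idx1
      have hidx1 : ctAdvance houses thr idx = idx + 1 + tw.length := by
        rw [ctAdvance_eq houses thr houses.length idx (by omega), hdrop,
          List.takeWhile_cons_of_pos (by simp [hthr]; omega), ← htw]
        simp
        omega
      set idx1 := ctAdvance houses thr idx with hidx1def
      -- last accepted element
      have hlast : PySem.List.pyGet? houses ((idx1 : Int) - 1) = some (tw.getLastD h0) := by
        have hlen_tw : idx + 1 + tw.length ≤ houses.length := by
          have : tw.length ≤ (houses.drop (idx + 1)).length := (List.takeWhile_prefix _).length_le
          simp [List.length_drop] at this
          omega
        have hcast : ((idx1 : Int) - 1) = ((idx + tw.length : Nat) : Int) := by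
          rw [hidx1]; push_cast; ring
        rw [hcast, PySem.List.pyGet?_natCast]
        have hpre : (h0 :: tw) <+: houses.drop idx := by
          rw [hdrop, htw]
          exact (List.prefix_cons_inj h0).mpr (List.takeWhile_prefix _)
        have hlt : tw.length < (houses.drop idx).length := by
          simp [List.length_drop]; omega
        have hidxlt : idx + tw.length < houses.length := by omega
        rw [List.getElem?_eq_getElem hidxlt]
        congr 1
        have e1 : houses[idx + tw.length] = (houses.drop idx)[tw.length]'hlt := by
          rw [List.getElem_drop]
        have e2 : (h0 :: tw)[tw.length]'(by simp) = (houses.drop idx)[tw.length]'hlt :=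
          hpre.getElem (by simp)
        have e3 : (h0 :: tw)[tw.length]'(by simp) = (h0 :: tw).getLast (by simp) := by
          rw [List.getLast_eq_getElem]
          rfl
        have e4 : (h0 :: tw).getLast (by simp) = tw.getLastD h0 := by
          cases tw with
          | nil => rfl
          | cons a l => simp [List.getLastD_eq_getLast?, List.getLast?_eq_some_getLast]
        rw [e1, ← e2, e3, e4]
      -- now compute the body of the outer iteration
      set last := tw.getLastD h0 with hlastdef
      set idx2 := ctAdvance houses (last + d) idx1 with hidx2def
      have hlen_tw : idx + 1 + tw.length ≤ houses.length := by
        have : tw.length ≤ (houses.drop (idx + 1)).length := (List.takeWhile_prefix _).length_le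
        simp [List.length_drop] at this
        omega
      have hidx2_ge : idx1 ≤ idx2 := by
        rw [hidx2def, ctAdvance_eq houses (last + d) houses.length idx1 (by omega)]
        omega
      -- identify the dropped suffixes
      have hdrop1 : houses.drop idx1 = (houses.drop (idx + 1)).dropWhile (fun y => decide (y ≤ thr)) := by
        rw [hidx1def, drop_ctAdvance houses thr idx (by omega), hdrop,
          List.dropWhile_cons_of_pos (by simp [hthr]; omega)]
      have hdrop2 : houses.drop idx2 =
          ((houses.drop (idx + 1)).dropWhile (fun y => decide (y ≤ thr))).dropWhile
            (fun y => decide (y ≤ last + d)) := by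
        rw [hidx2def, drop_ctAdvance houses (last + d) idx1 (by omega), hdrop1]
      have hS : ctS d (houses.drop idx) =
          1 + ctS d (((houses.drop (idx + 1)).dropWhile (fun y => decide (y ≤ thr))).dropWhile
            (fun y => decide (y ≤ last + d))) := by
        rw [hdrop, ctS]
        rw [ctClimb_eq thr (houses.drop (idx + 1)) h0]
      rw [ctLoop, if_pos h1]
      simp only [hget, Option.getD_some, ← hthr, ← hidx1def, hlast, ← hidx2def]
      rw [ih idx2 (t + 1) (by omega), hdrop2, hS]
      ring
    · rw [ctLoop]
      simp [h1, List.drop_eq_nil_of_le (by omega : houses.length ≤ idx), ctS]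

-- ===== VERDICT (by name: the statement is the Claim_ definition above) =====
theorem count_transmitters_spec : Claim_equal_count_transmitters := by
  intro houses d _ hpre
  unfold Spec_count_transmitters count_transmitters count_transmitters_alt
  rcases hpre with h | h
  · subst h; simp [ctLoop]
  · rw [ctLoop_eq houses d h houses.length 0 0 (by omega)]
    rw [foldB_eq_ctS d houses.length houses 0 (le_refl _)]
    simp
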